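-- pv_equiv track=rewrite | github.com/jaeyoung011/Python | Study/구현/시각.py | count_in_3
-- ===== SOURCE A (Python) =====
-- def count_in_3(hour):
--     count = 0
--     for h in range(hour+1):
--         for m in range(60):
--             for s in range(60):
--                 if '3' in str(h) + str(m) + str(s):
--                     count += 1
--     return count
-- ===== SOURCE B (Python) =====
-- def count_in_3(hour):
--     # Per-hour combinatorics: if the hour digits contain '3', all 3600 seconds count;
--     # otherwise only minute/second pairs with a '3' count: 3600 - 45*45 (45 of 0..59 lack '3').
--     partial = 3600 - 45 * 45
--     return sum(3600 if '3' in str(h) else partial for h in range(hour + 1))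
-- ===== Notes on version B (the rewrite author's own statement) =====
-- stated objective: faster
-- what changed: Replaces the 3600-iteration minute/second inner loops with a per-hour closed count: 3600 when str(h) contains '3', else 3600 - 45*45 (45 of 0..59 lack a '3').
import Mathlib
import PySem

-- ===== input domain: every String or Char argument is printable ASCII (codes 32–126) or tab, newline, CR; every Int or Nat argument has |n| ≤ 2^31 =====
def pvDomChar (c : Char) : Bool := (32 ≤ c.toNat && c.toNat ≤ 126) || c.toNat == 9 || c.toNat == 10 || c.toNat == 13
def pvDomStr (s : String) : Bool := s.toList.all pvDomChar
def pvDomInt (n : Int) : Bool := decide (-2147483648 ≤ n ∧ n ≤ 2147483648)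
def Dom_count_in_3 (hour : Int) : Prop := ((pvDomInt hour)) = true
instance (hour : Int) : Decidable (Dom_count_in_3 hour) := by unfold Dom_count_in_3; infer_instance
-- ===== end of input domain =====

-- B replaces A's triple loop over every second with a per-hour closed count
-- (3600 if the hour shows a '3', else 3600 - 45*45): a large constant-factor speed-up.


-- ===== PORT A =====
-- literal port: count = 0; triple loop h, m, s; '3' in str(h)+str(m)+str(s) → count += 1
def count_in_3 (hour : Int) : Int :=
  (PySem.List.pyRange 0 (hour + 1) 1).foldl (fun count h =>
    (PySem.List.pyRange 0 60 1).foldl (fun count m =>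
      (PySem.List.pyRange 0 60 1).foldl (fun count s =>
        if PySem.Chars.isIn ['3']
            (PySem.Int.toChars h ++ PySem.Int.toChars m ++ PySem.Int.toChars s)
        then count + 1 else count) count) count) 0

-- ===== PORT B =====
-- literal port of Source B: sum over hours of (3600 if '3' in str(h) else 3600 - 45*45)
def count_in_3_alt (hour : Int) : Int :=
  let off3600 : Int := 3600 - 45 * 45
  (PySem.List.pyRange 0 (hour + 1) 1).foldl
    (fun acc h => acc + (if PySem.Chars.isIn ['3'] (PySem.Int.toChars h) then 3600 else off3600)) 0

-- ===== PRECONDITION & SPEC =====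
def Spec_count_in_3 (hour : Int) (out : Int) : Prop := out = count_in_3_alt hour
instance (hour : Int) (out : Int) : Decidable (Spec_count_in_3 hour out) := by unfold Spec_count_in_3; infer_instance

-- ===== CLAIM (what is proved, stated in full; the proofs are below) =====
def Claim_equal_count_in_3 : Prop := ∀ (hour : Int), Dom_count_in_3 hour → Spec_count_in_3 hour (count_in_3 hour)

-- ===== LEMMAS AND PROOFS =====

-- '3' is in a concatenation iff it is in one of the parts
theorem isIn3_append (x y : List Char) :
    PySem.Chars.isIn ['3'] (x ++ y) = (PySem.Chars.isIn ['3'] x || PySem.Chars.isIn ['3'] y) := by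
  rw [Bool.eq_iff_iff]
  simp [PySem.Chars.isIn_iff_infix, List.singleton_infix_iff]

-- A's inner minute/second double loop adds exactly 3600 or 3600-45*45 to the accumulator
theorem inner_eq (h c : Int) :
    ((PySem.List.pyRange 0 60 1).foldl (fun count m =>
      (PySem.List.pyRange 0 60 1).foldl (fun count s =>
        if PySem.Chars.isIn ['3']
            (PySem.Int.toChars h ++ PySem.Int.toChars m ++ PySem.Int.toChars s)
        then count + 1 else count) count) c)
    = c + (if PySem.Chars.isIn ['3'] (PySem.Int.toChars h) then 3600 else 3600 - 45 * 45) := by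
  cases hb : PySem.Chars.isIn ['3'] (PySem.Int.toChars h) with
  | true =>
    simp only [isIn3_append, hb, Bool.true_or, if_true]
    simp only [show (fun (count : Int) (_ : Int) => count + 1) = fun count s => count + (fun _ : Int => (1:Int)) s from rfl,
      PySem.List.foldl_add]
    congr 1
  | false =>
    simp only [isIn3_append, hb, Bool.false_or]
    simp only [PySem.List.foldl_count_if, PySem.List.foldl_add]
    congr 1

theorem count_in_3_spec : Claim_equal_count_in_3 := by
  intro hour _
  unfold Spec_count_in_3 count_in_3 count_in_3_alt
  congr 1
  funext c h
  rw [inner_eq]
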